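-- pv_equiv track=rewrite | github.com/egeozsoy/ORacle | scene_graph_prediction/llava_helpers/scene_graph_converters.py | surgery_sg_to_memory_str
-- ===== SOURCE A (Python) =====
-- def surgery_sg_to_memory_str(surgery_sg_triplets, current_timepoint, TEMPORAL_STYLE='all'):
--     '''
--     Temporal style can be all, long, short, longshort
--     '''
--     memory_str = ''
--     last_reltimepoint = -1
--     if TEMPORAL_STYLE == 'all':
--         for timepoint, (sub, pred, obj) in surgery_sg_triplets:
--             rel_timepoint = current_timepoint - timepoint
--             if rel_timepoint == last_reltimepoint:  # add without timepoint
--                 memory_str += f'{sub},{obj},{pred}; '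
--             else:
--                 memory_str += f'T-{rel_timepoint}: {sub},{obj},{pred}; '  # add with timepoint
--                 last_reltimepoint = rel_timepoint
--     elif TEMPORAL_STYLE == 'short':
--         # Only include the most recent 5 changes, formatted as short term memory.
--         memory_str += 'Short: '
--         for timepoint, (sub, pred, obj) in surgery_sg_triplets[-5:]:
--             rel_timepoint = current_timepoint - timepoint
--             if rel_timepoint == last_reltimepoint:  # add without timepoint
--                 memory_str += f'{sub},{obj},{pred}; '
--             else:
--                 memory_str += f'T-{rel_timepoint}: {sub},{obj},{pred}; '  # add with timepoint
--                 last_reltimepoint = rel_timepoint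
--     elif TEMPORAL_STYLE == 'long':
--         # Only include long term memory, formatted in the long term manner.
--         memory_str += 'Long: '
--         occurrenced_triplets = set()
--         for timepoint, (sub, pred, obj) in surgery_sg_triplets[:-5]:
--             # simplified representation: Only the first occurance of every action is logged. "not" actions are also skipped.
--             if (sub, obj, pred) not in occurrenced_triplets and not pred.startswith('not '):
--                 occurrenced_triplets.add((sub, obj, pred))
--                 rel_timepoint = current_timepoint - timepoint
--                 if rel_timepoint == last_reltimepoint:  # add without timepoint
--                     memory_str += f'{sub},{obj},{pred}; '
--                 else:
--                     memory_str += f'T-{rel_timepoint}: {sub},{obj},{pred}; '  # add with timepoint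
--                     last_reltimepoint = rel_timepoint
--
--     elif TEMPORAL_STYLE == 'longshort':
--         # include both short and long term memory, formatted in the a mix of the two styles.
--         memory_str += 'Long: '
--         occurrenced_triplets = set()
--         for timepoint, (sub, pred, obj) in surgery_sg_triplets[:-5]:
--             # simplified representation: Only the first occurance of every action is logged. "not" actions are also skipped.
--             if (sub, obj, pred) not in occurrenced_triplets and not pred.startswith('not '):
--                 occurrenced_triplets.add((sub, obj, pred))
--                 rel_timepoint = current_timepoint - timepoint
--                 if rel_timepoint == last_reltimepoint:  # add without timepoint
--                     memory_str += f'{sub},{obj},{pred}; '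
--                 else:
--                     memory_str += f'T-{rel_timepoint}: {sub},{obj},{pred}; '  # add with timepoint
--                     last_reltimepoint = rel_timepoint
--         memory_str += 'Short: '
--         for timepoint, (sub, pred, obj) in surgery_sg_triplets[-5:]:
--             # full representation: All actions are logged. "not" actions are also logged.
--             rel_timepoint = current_timepoint - timepoint
--             if rel_timepoint == last_reltimepoint:  # add without timepoint
--                 memory_str += f'{sub},{obj},{pred}; '
--             else:
--                 memory_str += f'T-{rel_timepoint}: {sub},{obj},{pred}; '  # add with timepoint
--                 last_reltimepoint = rel_timepoint
--
--     if memory_str == '':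
--         return ''
--     return memory_str[:-2]
-- ===== SOURCE B (Python) =====
-- def surgery_sg_to_memory_str(surgery_sg_triplets, current_timepoint, TEMPORAL_STYLE='all'):
--     # Phase 1: build an ordered list of render items: labels (strings) or triplets.
--     items = []
--     if TEMPORAL_STYLE == 'all':
--         items = list(surgery_sg_triplets)
--     elif TEMPORAL_STYLE == 'short':
--         items = ['Short: '] + list(surgery_sg_triplets[-5:])
--     elif TEMPORAL_STYLE in ('long', 'longshort'):
--         items = ['Long: ']
--         seen = set()
--         for timepoint, (sub, pred, obj) in surgery_sg_triplets[:-5]: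
--             if (sub, obj, pred) not in seen and not pred.startswith('not '):
--                 seen.add((sub, obj, pred))
--                 items.append((timepoint, (sub, pred, obj)))
--         if TEMPORAL_STYLE == 'longshort':
--             items.append('Short: ')
--             items.extend(surgery_sg_triplets[-5:])
--     # Phase 2: render the items in one pass, joining at the end.
--     parts = []
--     last_reltimepoint = -1
--     for item in items:
--         if isinstance(item, str):
--             parts.append(item)
--         else:
--             timepoint, (sub, pred, obj) = item
--             rel = current_timepoint - timepoint
--             if rel == last_reltimepoint:
--                 parts.append(f'{sub},{obj},{pred}; ')
--             else:
--                 parts.append(f'T-{rel}: {sub},{obj},{pred}; ')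
--                 last_reltimepoint = rel
--     s = ''.join(parts)
--     return s[:-2] if s else s
-- ===== Notes on version B (the rewrite author's own statement) =====
-- stated objective: alternative
-- what changed: Restructured into two phases: first build an ordered list of render items (label markers plus the style-selected, dedup-filtered triplets), then a single rendering pass over that list that formats items into parts and joins them, instead of four inlined loops each concatenating onto one growing string.
import Mathlib
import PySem

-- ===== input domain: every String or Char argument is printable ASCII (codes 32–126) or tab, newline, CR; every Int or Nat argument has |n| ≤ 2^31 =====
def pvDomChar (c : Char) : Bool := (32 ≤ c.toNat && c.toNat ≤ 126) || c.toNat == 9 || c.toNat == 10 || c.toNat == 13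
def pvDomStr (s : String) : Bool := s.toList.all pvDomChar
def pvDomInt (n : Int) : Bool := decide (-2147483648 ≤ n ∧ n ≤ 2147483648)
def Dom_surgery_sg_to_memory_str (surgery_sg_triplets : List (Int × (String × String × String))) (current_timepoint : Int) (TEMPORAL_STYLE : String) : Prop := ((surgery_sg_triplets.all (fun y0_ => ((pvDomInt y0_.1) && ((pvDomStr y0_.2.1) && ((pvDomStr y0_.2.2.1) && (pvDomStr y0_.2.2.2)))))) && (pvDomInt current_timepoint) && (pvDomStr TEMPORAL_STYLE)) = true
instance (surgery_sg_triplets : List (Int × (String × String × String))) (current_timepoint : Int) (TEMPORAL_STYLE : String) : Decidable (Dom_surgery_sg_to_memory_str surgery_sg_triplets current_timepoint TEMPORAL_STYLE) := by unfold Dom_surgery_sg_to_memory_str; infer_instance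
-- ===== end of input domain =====

-- B restructures A's four inlined string-building loops into two phases (build a list of
-- render items, then one rendering pass that joins parts); alternative decomposition, same cost.

-- ===== PORT A =====
-- f'{sub},{obj},{pred}; '  (shared f-string body, as a char list)
def pvTripBody (sub pred obj : String) : List Char :=
  sub.toList ++ ',' :: obj.toList ++ ',' :: pred.toList ++ [';', ' ']

-- one iteration of A's formatting loop body: state (memory_str, last_reltimepoint)
def pvStepA (current : Int) (st : List Char × Int) (x : Int × (String × String × String)) : List Char × Int :=
  let rel := current - x.1
  if rel = st.2 then
    (st.1 ++ pvTripBody x.2.1 x.2.2.1 x.2.2.2, st.2)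
  else
    (st.1 ++ 'T' :: '-' :: PySem.Int.toChars rel ++ ':' :: ' ' :: pvTripBody x.2.1 x.2.2.1 x.2.2.2, rel)

-- one iteration of A's 'long' loop body: state (memory_str, last_reltimepoint, occurrenced_triplets)
def pvStepLongA (current : Int) (st : List Char × Int × PySem.Set (String × String × String)) (x : Int × (String × String × String)) : List Char × Int × PySem.Set (String × String × String) :=
  if !(PySem.Set.contains st.2.2 (x.2.1, x.2.2.2, x.2.2.1)) && !(PySem.Str.startswith x.2.2.1 "not ") then
    let st' := pvStepA current (st.1, st.2.1) x
    (st'.1, st'.2, PySem.Set.add st.2.2 (x.2.1, x.2.2.2, x.2.2.1))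
  else st

def surgery_sg_to_memory_str (surgery_sg_triplets : List (Int × (String × String × String))) (current_timepoint : Int) (TEMPORAL_STYLE : String) : String :=
  let memory : List Char :=
    if TEMPORAL_STYLE == "all" then
      (surgery_sg_triplets.foldl (pvStepA current_timepoint) ([], -1)).1
    else if TEMPORAL_STYLE == "short" then
      ((PySem.List.slice surgery_sg_triplets (some (-5)) none).foldl (pvStepA current_timepoint) ("Short: ".toList, -1)).1
    else if TEMPORAL_STYLE == "long" then
      ((PySem.List.slice surgery_sg_triplets none (some (-5))).foldl (pvStepLongA current_timepoint) ("Long: ".toList, -1, PySem.Set.empty)).1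
    else if TEMPORAL_STYLE == "longshort" then
      let st := (PySem.List.slice surgery_sg_triplets none (some (-5))).foldl (pvStepLongA current_timepoint) ("Long: ".toList, -1, PySem.Set.empty)
      ((PySem.List.slice surgery_sg_triplets (some (-5)) none).foldl (pvStepA current_timepoint) (st.1 ++ "Short: ".toList, st.2.1)).1
    else []
  if memory = [] then "" else String.ofList (PySem.List.slice memory none (some (-2)))

-- ===== PORT B =====
-- a render item: a label marker (inl) or a triplet to format (inr)
-- phase-1 collection step for the 'long' part: state (items, seen)
def pvCollectStep (acc : List (Sum (List Char) (Int × (String × String × String))) × PySem.Set (String × String × String)) (x : Int × (String × String × String)) : List (Sum (List Char) (Int × (String × String × String))) × PySem.Set (String × String × String) :=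
  if !(PySem.Set.contains acc.2 (x.2.1, x.2.2.2, x.2.2.1)) && !(PySem.Str.startswith x.2.2.1 "not ") then
    (acc.1 ++ [Sum.inr x], PySem.Set.add acc.2 (x.2.1, x.2.2.2, x.2.2.1))
  else acc

-- phase 1: the ordered list of render items for a style
def pvItems (surgery_sg_triplets : List (Int × (String × String × String))) (style : String) : List (Sum (List Char) (Int × (String × String × String))) :=
  if style == "all" then surgery_sg_triplets.map Sum.inr
  else if style == "short" then
    Sum.inl "Short: ".toList :: (PySem.List.slice surgery_sg_triplets (some (-5)) none).map Sum.inr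
  else if style == "long" || style == "longshort" then
    let long := Sum.inl "Long: ".toList ::
      ((PySem.List.slice surgery_sg_triplets none (some (-5))).foldl pvCollectStep ([], PySem.Set.empty)).1
    if style == "longshort" then
      long ++ Sum.inl "Short: ".toList :: (PySem.List.slice surgery_sg_triplets (some (-5)) none).map Sum.inr
    else long
  else []

-- phase 2: render one item; state (parts, last_reltimepoint)
def pvRender (current : Int) (st : List (List Char) × Int) (it : Sum (List Char) (Int × (String × String × String))) : List (List Char) × Int :=
  match it with
  | Sum.inl lab => (st.1 ++ [lab], st.2)
  | Sum.inr x =>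
    let rel := current - x.1
    if rel = st.2 then (st.1 ++ [pvTripBody x.2.1 x.2.2.1 x.2.2.2], st.2)
    else (st.1 ++ ['T' :: '-' :: PySem.Int.toChars rel ++ ':' :: ' ' :: pvTripBody x.2.1 x.2.2.1 x.2.2.2], rel)

def surgery_sg_to_memory_str_alt (surgery_sg_triplets : List (Int × (String × String × String))) (current_timepoint : Int) (TEMPORAL_STYLE : String) : String :=
  let s : List Char := (((pvItems surgery_sg_triplets TEMPORAL_STYLE).foldl (pvRender current_timepoint) ([], -1)).1).flatten
  if s = [] then "" else String.ofList (PySem.List.slice s none (some (-2)))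

-- ===== PRECONDITION & SPEC =====
def Spec_surgery_sg_to_memory_str (surgery_sg_triplets : List (Int × (String × String × String))) (current_timepoint : Int) (TEMPORAL_STYLE : String) (out : String) : Prop := out = surgery_sg_to_memory_str_alt surgery_sg_triplets current_timepoint TEMPORAL_STYLE
instance (surgery_sg_triplets : List (Int × (String × String × String))) (current_timepoint : Int) (TEMPORAL_STYLE : String) (out : String) : Decidable (Spec_surgery_sg_to_memory_str surgery_sg_triplets current_timepoint TEMPORAL_STYLE out) := by unfold Spec_surgery_sg_to_memory_str; infer_instance

-- ===== CLAIM (what is proved, stated in full; the proofs are below) =====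
def Claim_equal_surgery_sg_to_memory_str : Prop := ∀ (surgery_sg_triplets : List (Int × (String × String × String))) (current_timepoint : Int) (TEMPORAL_STYLE : String), Dom_surgery_sg_to_memory_str surgery_sg_triplets current_timepoint TEMPORAL_STYLE → Spec_surgery_sg_to_memory_str surgery_sg_triplets current_timepoint TEMPORAL_STYLE (surgery_sg_to_memory_str surgery_sg_triplets current_timepoint TEMPORAL_STYLE)

-- ===== LEMMAS AND PROOFS =====

-- rendering the inr-items of xs = A's plain formatting fold over xs (flatten of the parts)
theorem pv_render_inr (cur : Int) (xs : List (Int × (String × String × String))) :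
    ∀ (parts : List (List Char)) (last : Int),
      ((xs.map Sum.inr).foldl (pvRender cur) (parts, last)).1.flatten
          = (xs.foldl (pvStepA cur) (parts.flatten, last)).1
      ∧ ((xs.map Sum.inr).foldl (pvRender cur) (parts, last)).2
          = (xs.foldl (pvStepA cur) (parts.flatten, last)).2 := by
  induction xs with
  | nil => intro parts last; simp
  | cons x xs ih =>
      intro parts last
      simp only [List.map_cons, List.foldl_cons, pvRender, pvStepA]
      by_cases h : cur - x.1 = last
      · simpa [h] using ih (parts ++ [pvTripBody x.2.1 x.2.2.1 x.2.2.2]) last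
      · simpa [h] using ih (parts ++ ['T' :: '-' :: PySem.Int.toChars (cur - x.1) ++ ':' :: ' ' :: pvTripBody x.2.1 x.2.2.1 x.2.2.2]) (cur - x.1)

-- the triplets B's phase 1 selects for the 'long' part, with the final seen-set
def pvSelT : List (Int × (String × String × String)) → PySem.Set (String × String × String) → List (Int × (String × String × String)) × PySem.Set (String × String × String)
  | [], seen => ([], seen)
  | x :: xs, seen =>
    if !(PySem.Set.contains seen (x.2.1, x.2.2.2, x.2.2.1)) && !(PySem.Str.startswith x.2.2.1 "not ") then
      let r := pvSelT xs (PySem.Set.add seen (x.2.1, x.2.2.2, x.2.2.1))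
      (x :: r.1, r.2)
    else pvSelT xs seen

theorem pv_collect_eq_sel (xs : List (Int × (String × String × String))) :
    ∀ its seen, xs.foldl pvCollectStep (its, seen)
      = (its ++ ((pvSelT xs seen).1).map Sum.inr, (pvSelT xs seen).2) := by
  induction xs with
  | nil => intro its seen; simp [pvSelT]
  | cons x xs ih =>
      intro its seen
      cases hc : (!(PySem.Set.contains seen (x.2.1, x.2.2.2, x.2.2.1)) && !(PySem.Str.startswith x.2.2.1 "not ")) with
      | true => simp only [List.foldl_cons, pvCollectStep, pvSelT, hc]; simp [ih]
      | false => simp only [List.foldl_cons, pvCollectStep, pvSelT, hc]; simp [ih]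

-- A's 'long' fold = A's plain fold over the selected triplets
theorem pv_long_eq_sel (cur : Int) (xs : List (Int × (String × String × String))) :
    ∀ (chars : List Char) (last : Int) (seen : PySem.Set (String × String × String)),
      xs.foldl (pvStepLongA cur) (chars, last, seen)
        = ((((pvSelT xs seen).1).foldl (pvStepA cur) (chars, last)).1,
           (((pvSelT xs seen).1).foldl (pvStepA cur) (chars, last)).2,
           (pvSelT xs seen).2) := by
  induction xs with
  | nil => intro chars last seen; simp [pvSelT]
  | cons x xs ih =>
      intro chars last seen
      cases hc : (!(PySem.Set.contains seen (x.2.1, x.2.2.2, x.2.2.1)) && !(PySem.Str.startswith x.2.2.1 "not ")) with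
      | true =>
          simp only [List.foldl_cons, pvStepLongA, pvSelT, hc]
          simp only [if_true]
          rw [ih]
          simp
      | false =>
          simp only [List.foldl_cons, pvStepLongA, pvSelT, hc]
          simp only [Bool.false_eq_true, reduceIte]
          rw [ih]

-- normalized corollaries, in the exact shapes the main proof meets
theorem pv_ren_plain (cur : Int) (xs : List (Int × (String × String × String))) :
    ((xs.map Sum.inr).foldl (pvRender cur) ([], -1)).1.flatten
      = (xs.foldl (pvStepA cur) ([], -1)).1 := by
  simpa using (pv_render_inr cur xs [] (-1)).1

theorem pv_ren_lab (cur : Int) (lab : List Char) (xs : List (Int × (String × String × String))) :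
    ((Sum.inl lab :: xs.map Sum.inr).foldl (pvRender cur) ([], -1)).1.flatten
      = (xs.foldl (pvStepA cur) (lab, -1)).1 := by
  simpa [pvRender] using (pv_render_inr cur xs [lab] (-1)).1

theorem pv_ren_longshort (cur : Int) (sel tail5 : List (Int × (String × String × String))) :
    ((Sum.inl "Long: ".toList :: sel.map Sum.inr ++ Sum.inl "Short: ".toList :: tail5.map Sum.inr).foldl (pvRender cur) ([], -1)).1.flatten
      = (tail5.foldl (pvStepA cur)
          ((sel.foldl (pvStepA cur) ("Long: ".toList, -1)).1 ++ "Short: ".toList,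
           (sel.foldl (pvStepA cur) ("Long: ".toList, -1)).2)).1 := by
  simp only [List.foldl_cons, List.foldl_append, pvRender]
  have h1 := pv_render_inr cur sel ([] ++ ["Long: ".toList]) (-1)
  set F := ((sel.map Sum.inr).foldl (pvRender cur) (([] ++ ["Long: ".toList]), -1)) with hF
  have h2 := (pv_render_inr cur tail5 (F.1 ++ ["Short: ".toList]) F.2).1
  rw [h2]
  have hfl : (F.1 ++ ["Short: ".toList]).flatten
      = (sel.foldl (pvStepA cur) ("Long: ".toList, -1)).1 ++ "Short: ".toList := by
    simp only [List.flatten_append]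
    rw [h1.1]
    simp
  rw [hfl, h1.2]
  simp

-- ===== VERDICT (by name: the statement is the Claim_ definition above) =====
theorem surgery_sg_to_memory_str_spec : Claim_equal_surgery_sg_to_memory_str := by
  intro trips cur style _
  unfold Spec_surgery_sg_to_memory_str surgery_sg_to_memory_str surgery_sg_to_memory_str_alt pvItems
  by_cases hall : style = "all"
  · subst hall
    simp only [beq_self_eq_true, if_pos]
    rw [pv_ren_plain]
  · by_cases hshort : style = "short"
    · subst hshort
      simp only [beq_iff_eq, String.reduceEq, if_false, beq_self_eq_true, if_true, reduceIte]
      rw [pv_ren_lab]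
    · by_cases hlong : style = "long"
      · subst hlong
        simp only [beq_iff_eq, String.reduceEq, if_false, beq_self_eq_true, Bool.or_eq_true, true_or, if_true, reduceIte]
        rw [pv_long_eq_sel, pv_collect_eq_sel]
        simp only [List.nil_append]
        rw [pv_ren_lab]
      · by_cases hls : style = "longshort"
        · subst hls
          simp only [beq_iff_eq, String.reduceEq, if_false, beq_self_eq_true, Bool.or_eq_true, or_true, if_true, reduceIte]
          rw [pv_long_eq_sel, pv_collect_eq_sel]
          simp only [List.nil_append]
          rw [pv_ren_longshort]
        · simp [hall, hshort, hlong, hls]
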